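-- pv_equiv track=rewrite | github.com/yair-shtern/Intro2CS | ex5/wordsearch.py | check_right_down
-- ===== SOURCE A (Python) =====
-- def count_word(word,string):
--     """
--     Count the appearance of word in string (at list 1)
--     :param: word: a word to search in string
--     :param: string: a string
--     :return: the count of appearance of word in string
--     """
--     count = 1
--     short_string = string[string.find(word) + 1:]
--     while string != '':
--         if word in short_string:
--             count += 1
--             short_string = short_string[short_string.find(word) + 1:]
--         else:
--             break
--     return count
--
-- def check_and_update(result_dict,string,word_list):
--     """
--     Check if word in a string and update in the result dict
--     :param: result_dict: a dict with the result of the word founds so far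
--     :param: string: a string
--     :param: word_list: a list of word to check if in the string
--     :return: None
--     """
--     for word in word_list:
--         if word in string:
--             if word in result_dict:
--                 result_dict[word] += count_word(word,string)
--             else:
--                 result_dict[word] = count_word(word,string)
--     return
--
-- def check_right_down(result_dict,word_list,matrix):
--     """
--      Check if words in the matrix in direction - right diagonal down
--      :param: result_dict: a dict with the result of the word founds so far
--      :param: word_list: a list of words
--      :param: matrix: a matrix to check on
--      :return: the updated dict
--      """
--     index1 = 0
--     while index1 < len(matrix):
--         str1 = right_down_diagonal(matrix,index1,0)
--         check_and_update(result_dict,str1,word_list)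
--         index1 += 1
--     index2 = 1
--     while index2 < len(matrix[0]):
--         str2 = right_down_diagonal(matrix,0,index2)
--         check_and_update(result_dict,str2,word_list)
--         index2 += 1
--     return result_dict
--
-- def right_down_diagonal(matrix,i,j):
--     """
--      Make string in direction - right diagonal down
--      :param: matrix: a matrix to make the string from
--      :param: i: index1
--      :param: j: index2
--      :return: the string
--      """
--     string = ''
--     while i < len(matrix) and j < len(matrix[0]):
--         string += matrix[i][j]
--         i += 1
--         j += 1
--     return string
-- ===== SOURCE B (Python) =====
-- def check_right_down(result_dict, word_list, matrix):
--     """Count words along right-down diagonals: group cells into diagonal buckets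
--     keyed by i - j in one nested pass, then count overlapping occurrences per
--     bucket string by scanning all start positions."""
--     m0 = len(matrix[0])
--     buckets = {}
--     for i, row in enumerate(matrix):
--         for j, cell in enumerate(row[:m0]):
--             buckets.setdefault(i - j, []).append(cell)
--     order = list(range(len(matrix))) + list(range(-1, -m0, -1))
--     for d in order:
--         s = ''.join(buckets.get(d, []))
--         for w in word_list:
--             if w in s:
--                 cnt = sum(1 for k in range(len(s) - len(w) + 1) if s[k:k + len(w)] == w)
--                 result_dict[w] = result_dict.get(w, 0) + cnt
--     return result_dict
-- ===== Notes on version B (the rewrite author's own statement) =====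
-- stated objective: alternative
-- what changed: B replaces A's per-diagonal walker (two driver loops each re-walking the matrix cell by cell) and A's find-and-cut occurrence counter with one grouping pass that buckets all cells into a dict keyed by i-j, joins each bucket into the diagonal string, and counts overlapping occurrences by scanning all start positions with slice comparison; dict updates use get(w,0)+cnt instead of A's contains/modify branch.
import Mathlib
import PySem

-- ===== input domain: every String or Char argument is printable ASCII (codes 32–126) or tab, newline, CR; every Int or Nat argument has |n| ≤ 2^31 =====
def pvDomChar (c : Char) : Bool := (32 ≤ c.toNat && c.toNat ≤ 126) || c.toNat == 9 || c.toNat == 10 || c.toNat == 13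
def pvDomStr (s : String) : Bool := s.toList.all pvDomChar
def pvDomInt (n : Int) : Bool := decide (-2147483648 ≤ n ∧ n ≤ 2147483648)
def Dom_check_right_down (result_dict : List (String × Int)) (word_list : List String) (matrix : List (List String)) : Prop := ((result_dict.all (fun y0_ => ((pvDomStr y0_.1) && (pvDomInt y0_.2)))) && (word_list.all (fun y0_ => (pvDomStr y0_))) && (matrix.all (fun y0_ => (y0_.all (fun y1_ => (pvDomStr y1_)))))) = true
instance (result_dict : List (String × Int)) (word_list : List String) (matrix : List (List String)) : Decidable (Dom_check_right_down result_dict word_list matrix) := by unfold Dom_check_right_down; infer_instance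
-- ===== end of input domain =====

-- B groups the matrix cells into a dict of diagonals keyed by i-j in one nested pass and counts
-- overlapping occurrences by scanning all start positions, instead of A's per-diagonal walker and
-- find-and-cut counter; same cost class (objective: alternative).

-- ===== PORT A =====

-- right_down_diagonal(matrix, i, j): walk down-right accumulating the cells
def pyA_diag (matrix : List (List String)) (i j : Int) (acc : List Char) : List Char :=
  if h : i < (matrix.length : Int) ∧ j < ((PySem.List.pyGetD matrix 0 []).length : Int) then
    pyA_diag matrix (i + 1) (j + 1)
      (acc ++ (PySem.List.pyGetD (PySem.List.pyGetD matrix i []) j "").toList)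
  else acc
termination_by ((matrix.length : Int) - i).toNat
decreasing_by omega

-- the while-loop of count_word; fuel = len(string)+1 suffices wherever Python terminates
def pyA_cwLoop (word string shortS : List Char) (count : Int) : Nat → Int
  | 0 => count
  | fuel + 1 =>
    if string ≠ [] then
      if PySem.Chars.isIn word shortS then
        pyA_cwLoop word string
          (PySem.List.slice shortS (some (PySem.Chars.find shortS word + 1)) none)
          (count + 1) fuel
      else count
    else count

def pyA_countWord (word string : List Char) : Int :=
  pyA_cwLoop word string
    (PySem.List.slice string (some (PySem.Chars.find string word + 1)) none)
    1 (string.length + 1)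

-- check_and_update(result_dict, string, word_list)
def pyA_update (d : PySem.Dict String Int) (string : List Char) (wl : List String) :
    PySem.Dict String Int :=
  wl.foldl (fun d word =>
    if PySem.Chars.isIn word.toList string then
      if d.contains word then d.modify word 0 (· + pyA_countWord word.toList string)
      else d.insert word (pyA_countWord word.toList string)
    else d) d

def check_right_down (result_dict : List (String × Int)) (word_list : List String)
    (matrix : List (List String)) : List (String × Int) :=
  let d1 := (PySem.List.pyRange 0 (matrix.length : Int) 1).foldl
    (fun d i1 => pyA_update d (pyA_diag matrix i1 0 []) word_list) (PySem.Dict.mk result_dict)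
  let d2 := (PySem.List.pyRange 1 ((PySem.List.pyGetD matrix 0 []).length : Int) 1).foldl
    (fun d i2 => pyA_update d (pyA_diag matrix 0 i2 []) word_list) d1
  d2.items

-- ===== PORT B =====

-- cnt = sum(1 for k in range(len(s)-len(w)+1) if s[k:k+len(w)] == w)
def pyB_cnt (w s : List Char) : Int :=
  (PySem.List.pyRange 0 ((s.length : Int) - (w.length : Int) + 1) 1).foldl
    (fun acc k =>
      acc + if PySem.List.slice s (some k) (some (k + (w.length : Int))) == w then 1 else 0) 0

-- buckets: for i,row in enumerate(matrix): for j,cell in enumerate(row[:m0]): buckets.setdefault(i-j,[]).append(cell)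
def pyB_buckets (matrix : List (List String)) (m0 : Int) : PySem.Dict Int (List String) :=
  (PySem.List.enumerate matrix).foldl
    (fun b p =>
      (PySem.List.enumerate (PySem.List.slice p.2 none (some m0))).foldl
        (fun b q => b.modify (p.1 - q.1) [] (· ++ [q.2])) b)
    PySem.Dict.empty

def check_right_down_alt (result_dict : List (String × Int)) (word_list : List String)
    (matrix : List (List String)) : List (String × Int) :=
  let m0 : Int := ((PySem.List.pyGetD matrix 0 []).length : Int)
  let buckets := pyB_buckets matrix m0
  let order := PySem.List.pyRange 0 (matrix.length : Int) 1 ++ PySem.List.pyRange (-1) (-m0) (-1)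
  (order.foldl (fun d dg =>
      let s := PySem.Chars.join [] ((buckets.getD dg []).map String.toList)
      word_list.foldl (fun d w =>
        if PySem.Chars.isIn w.toList s then d.insert w (d.getD w 0 + pyB_cnt w.toList s) else d) d)
    (PySem.Dict.mk result_dict)).items

-- ===== PRECONDITION & SPEC =====
-- Pre_ excludes exactly the inputs where Python A does not return: the empty matrix and matrices
-- with a row shorter than row 0 (IndexError), and word lists containing the empty word while some
-- scanned cell is nonempty (count_word loops forever there).
def Pre_check_right_down (result_dict : List (String × Int)) (word_list : List String)
    (matrix : List (List String)) : Prop :=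
  matrix ≠ [] ∧ (∀ row ∈ matrix, (matrix.headD []).length ≤ row.length) ∧
    ("" ∈ word_list → ∀ row ∈ matrix, ∀ c ∈ row.take (matrix.headD []).length, c = "")
instance (result_dict : List (String × Int)) (word_list : List String) (matrix : List (List String)) : Decidable (Pre_check_right_down result_dict word_list matrix) := by unfold Pre_check_right_down; infer_instance

def pvWitness_check_right_down : (List (String × Int)) × List String × List (List String) :=
  ([("ab", 2)], ["a", "ab"], [["a", "b"], ["b", "a"]])

def Spec_check_right_down (result_dict : List (String × Int)) (word_list : List String) (matrix : List (List String)) (out : List (String × Int)) : Prop := out = check_right_down_alt result_dict word_list matrix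
instance (result_dict : List (String × Int)) (word_list : List String) (matrix : List (List String)) (out : List (String × Int)) : Decidable (Spec_check_right_down result_dict word_list matrix out) := by unfold Spec_check_right_down; infer_instance

-- ===== CLAIM (what is proved, stated in full; the proofs are below) =====
def Claim_equal_check_right_down : Prop := ∀ (result_dict : List (String × Int)) (word_list : List String) (matrix : List (List String)), Dom_check_right_down result_dict word_list matrix → Pre_check_right_down result_dict word_list matrix → Spec_check_right_down result_dict word_list matrix (check_right_down result_dict word_list matrix)


-- ===== LEMMAS AND PROOFS =====

-- abstract right-down diagonal string starting at column b of the first of `rows`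
def dstr (rows : List (List String)) (m0 b : Nat) : List Char :=
  match rows with
  | [] => []
  | r :: rest => if b < m0 then (r.getD b "").toList ++ dstr rest m0 (b + 1) else []

-- cells collected by B's buckets for diagonal dg, rows starting at index i0
def collect (rows : List (List String)) (i0 dg m0 : Int) : List String :=
  match rows with
  | [] => []
  | r :: rest =>
    (if 0 ≤ i0 - dg ∧ (i0 - dg).toNat < (PySem.List.slice r none (some m0)).length then
      [(PySem.List.slice r none (some m0)).getD (i0 - dg).toNat ""] else []) ++
    collect rest (i0 + 1) dg m0

-- number of overlapping occurrences of w in s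
def occ (w s : List Char) : Nat :=
  (List.range (s.length - w.length + 1)).countP (fun k => decide (w <+: s.drop k))

lemma dstr_of_ge {rows : List (List String)} {m0 b : Nat} (h : m0 ≤ b) : dstr rows m0 b = [] := by
  cases rows <;> simp [dstr] <;> omega

lemma join_nil_eq_flatten (l : List (List Char)) : PySem.Chars.join [] l = l.flatten := by
  induction l with
  | nil => rfl
  | cons x t ih =>
    cases t with
    | nil => simp [PySem.Chars.join_singleton]
    | cons y u => rw [PySem.Chars.join_cons_cons] at *; simp_all

theorem row_filter (xs : List String) (i0 : Int) : ∀ (s dg : Int),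
    (((PySem.List.enumerate xs s)).map (fun q => (i0 - q.1, q.2))).filter (fun p => p.1 == dg)
      = if 0 ≤ i0 - s - dg ∧ (i0 - s - dg).toNat < xs.length then
          [(dg, xs.getD (i0 - s - dg).toNat "")] else [] := by
  induction xs with
  | nil => intro s dg; simp [PySem.List.enumerate]
  | cons x t ih =>
    intro s dg
    rw [show PySem.List.enumerate (x :: t) s = (s, x) :: PySem.List.enumerate t (s+1) from by
      simp [PySem.List.enumerate]]
    rw [List.map_cons, List.filter_cons, ih (s+1) dg]
    by_cases h : i0 - s = dg
    · have h0 : (i0 - s - dg).toNat = 0 := by omega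
      have hn : ¬ (0 ≤ i0 - (s+1) - dg ∧ (i0 - (s+1) - dg).toNat < t.length) := by omega
      simp [h, hn, h0]
      omega
    · have hne : ((i0 - s == dg) : Bool) = false := by simp; omega
      simp only [hne, cond_false]
      by_cases hc : 0 ≤ i0 - s - dg ∧ (i0 - s - dg).toNat < (x :: t).length
      · have hc' : 0 ≤ i0 - (s+1) - dg ∧ (i0 - (s+1) - dg).toNat < t.length := by
          simp at hc ⊢; omega
        have hidx : (i0 - s - dg).toNat = (i0 - (s+1) - dg).toNat + 1 := by omega
        rw [if_pos hc', if_pos hc]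
        simp [hidx]
      · have hc' : ¬ (0 ≤ i0 - (s+1) - dg ∧ (i0 - (s+1) - dg).toNat < t.length) := by
          simp at hc ⊢; omega
        rw [if_neg hc', if_neg hc]
        simp

theorem buckets_getD (m0 : Int) (rows : List (List String)) : ∀ (b : PySem.Dict Int (List String))
    (i0 dg : Int),
    ((PySem.List.enumerate rows i0).foldl
      (fun b p =>
        (PySem.List.enumerate (PySem.List.slice p.2 none (some m0))).foldl
          (fun b q => b.modify (p.1 - q.1) [] (· ++ [q.2])) b) b).getD dg []
      = b.getD dg [] ++ collect rows i0 dg m0 := by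
  induction rows with
  | nil => intro b i0 dg; simp [PySem.List.enumerate, collect]
  | cons r rest ih =>
    intro b i0 dg
    rw [show PySem.List.enumerate (r :: rest) i0 = (i0, r) :: PySem.List.enumerate rest (i0+1) from by
      simp [PySem.List.enumerate]]
    rw [List.foldl_cons, ih]
    have hinner : ∀ (b : PySem.Dict Int (List String)),
        ((PySem.List.enumerate (PySem.List.slice r none (some m0))).foldl
          (fun b q => b.modify (i0 - q.1) [] (· ++ [q.2])) b).getD dg []
        = b.getD dg [] ++ (if 0 ≤ i0 - dg ∧ (i0 - dg).toNat < (PySem.List.slice r none (some m0)).length then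
      [(PySem.List.slice r none (some m0)).getD (i0 - dg).toNat ""] else []) := by
      intro b
      rw [show ((PySem.List.enumerate (PySem.List.slice r none (some m0))).foldl
          (fun b q => b.modify (i0 - q.1) [] (· ++ [q.2])) b)
        = ((PySem.List.enumerate (PySem.List.slice r none (some m0))).map
            (fun q => (i0 - q.1, q.2))).foldl
          (fun b p => b.modify p.1 [] (· ++ [p.2])) b from by rw [List.foldl_map]]
      rw [PySem.Dict.getD_foldl_modify_append, row_filter]
      by_cases h : 0 ≤ i0 - 0 - dg ∧ (i0 - 0 - dg).toNat < (PySem.List.slice r none (some m0)).length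
      · have h' : 0 ≤ i0 - dg ∧ (i0 - dg).toNat < (PySem.List.slice r none (some m0)).length := by
          simpa using h
        rw [if_pos h, if_pos h']
        simp
      · rw [if_neg h, if_neg (by simpa using h)]
        simp
    rw [hinner, collect]
    simp

theorem join_collect (m0n : Nat) (rows : List (List String)) : ∀ (i0 dg : Int),
    (∀ r ∈ rows, m0n ≤ r.length) →
    PySem.Chars.join [] ((collect rows i0 dg (m0n : Int)).map String.toList)
      = dstr (rows.drop (dg - i0).toNat) m0n (i0 - dg).toNat := by
  induction rows with
  | nil => intro i0 dg _; simp [collect, dstr]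
  | cons r rest ih =>
    intro i0 dg hr
    have hrl : m0n ≤ r.length := hr r (by simp)
    have hsl : PySem.List.slice r none (some (m0n : Int)) = r.take m0n :=
      PySem.List.slice_to_natCast r m0n
    have hlen : (PySem.List.slice r none (some (m0n : Int))).length = m0n := by
      rw [hsl]; simp; omega
    rw [collect]
    by_cases hge : i0 ≥ dg
    · have hdrop : (dg - i0).toNat = 0 := by omega
      rw [hdrop, List.drop_zero]
      by_cases hb : (i0 - dg).toNat < m0n
      · have hc : 0 ≤ i0 - dg ∧ (i0 - dg).toNat < (PySem.List.slice r none (some (m0n:Int))).length := by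
          rw [hlen]; omega
        rw [if_pos hc]
        have hcell : (PySem.List.slice r none (some (m0n:Int))).getD (i0 - dg).toNat ""
            = r.getD (i0 - dg).toNat "" := by
          rw [hsl]
          rw [List.getD, List.getD, List.getElem?_take_of_lt hb]
        rw [List.singleton_append, List.map_cons, join_nil_eq_flatten, List.flatten_cons, ← join_nil_eq_flatten]
        rw [ih (i0+1) dg (fun r hr' => hr r (by simp [hr']))]
        have h1 : (dg - (i0+1)).toNat = 0 := by omega
        have h2 : (i0 + 1 - dg).toNat = (i0 - dg).toNat + 1 := by omega
        rw [h1, h2, List.drop_zero, hcell]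
        rw [show dstr (r :: rest) m0n (i0 - dg).toNat
          = (r.getD (i0 - dg).toNat "").toList ++ dstr rest m0n ((i0 - dg).toNat + 1) from by
          rw [dstr]; simp [hb]]
      · have hc : ¬ (0 ≤ i0 - dg ∧ (i0 - dg).toNat < (PySem.List.slice r none (some (m0n:Int))).length) := by
          rw [hlen]; omega
        rw [if_neg hc, List.nil_append]
        rw [ih (i0+1) dg (fun r hr' => hr r (by simp [hr']))]
        have h1 : (dg - (i0+1)).toNat = 0 := by omega
        rw [h1, List.drop_zero, dstr_of_ge (by omega), dstr_of_ge (by omega)]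
    · have hc : ¬ (0 ≤ i0 - dg ∧ (i0 - dg).toNat < (PySem.List.slice r none (some (m0n:Int))).length) := by
        omega
      rw [if_neg hc, List.nil_append]
      rw [ih (i0+1) dg (fun r hr' => hr r (by simp [hr']))]
      have h1 : (dg - i0).toNat = (dg - (i0+1)).toNat + 1 := by omega
      have h2 : (i0 - dg).toNat = 0 := by omega
      have h3 : (i0 + 1 - dg).toNat = 0 := by omega
      rw [h1, h2, h3, List.drop_succ_cons]

theorem pyA_diag_eq (matrix : List (List String)) (k : Nat) : ∀ (i j : Int), 0 ≤ i → 0 ≤ j →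
    (matrix.length - i.toNat) = k → ∀ (acc : List Char),
    pyA_diag matrix i j acc
      = acc ++ dstr (matrix.drop i.toNat) (PySem.List.pyGetD matrix 0 []).length j.toNat := by
  induction k using Nat.strong_induction_on with
  | _ k ihk =>
  intro i j hi hj hk acc
  rw [pyA_diag]
  by_cases h : i < (matrix.length : Int) ∧ j < ((PySem.List.pyGetD matrix 0 []).length : Int)
  · rw [dif_pos h]
    have hilt : i.toNat < matrix.length := by omega
    rw [ihk (matrix.length - (i+1).toNat) (by omega) (i+1) (j+1) (by omega) (by omega) rfl]
    have hdrop : matrix.drop i.toNat = matrix[i.toNat] :: matrix.drop (i.toNat + 1) :=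
      (List.getElem_cons_drop hilt).symm
    have hrow : PySem.List.pyGetD matrix i [] = matrix[i.toNat] := by
      rw [PySem.List.pyGetD_eq_getElem matrix [] hi (by omega)]
    have hcell : PySem.List.pyGetD (PySem.List.pyGetD matrix i []) j ""
        = matrix[i.toNat].getD j.toNat "" := by
      rw [hrow]
      unfold PySem.List.pyGetD
      rw [PySem.List.pyGet?_of_nonneg _ hj, List.getD]
    have h1 : (i+1).toNat = i.toNat + 1 := by omega
    have h2 : (j+1).toNat = j.toNat + 1 := by omega
    rw [hdrop, h1, h2, hcell]
    rw [show dstr (matrix[i.toNat] :: matrix.drop (i.toNat+1))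
        (PySem.List.pyGetD matrix 0 []).length j.toNat
      = (matrix[i.toNat].getD j.toNat "").toList
        ++ dstr (matrix.drop (i.toNat+1)) (PySem.List.pyGetD matrix 0 []).length (j.toNat+1) from by
      rw [dstr]; simp only [if_pos (show j.toNat < (PySem.List.pyGetD matrix 0 []).length by omega)]]
    simp
  · rw [dif_neg h]
    rcases not_and_or.mp h with h' | h'
    · rw [List.drop_eq_nil_of_le (by omega)]
      simp [dstr]
    · rw [dstr_of_ge (by omega)]
      simp

lemma prefix_drop_infix {w s : List Char} {k : Nat} (h : w <+: s.drop k) : w <:+: s :=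
  h.isInfix.trans (s.drop_suffix k).isInfix

lemma occ_zero {w s : List Char} (h : ¬ w <:+: s) : occ w s = 0 := by
  unfold occ
  rw [List.countP_eq_zero]
  intro k _
  simp only [decide_eq_true_eq]
  exact fun hp => h (prefix_drop_infix hp)

lemma occ_rec {w s : List Char} (hw : w ≠ []) (h : w <:+: s) :
    occ w s = 1 + occ w (s.drop ((PySem.Chars.find s w).toNat + 1)) := by
  have hf : 0 ≤ PySem.Chars.find s w := (PySem.Chars.find_nonneg_iff s w).mpr h
  obtain ⟨hpre, hmin⟩ := PySem.Chars.find_spec hf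
  set p := (PySem.Chars.find s w).toNat with hp
  have hpre' : w <+: s.drop p := hpre
  have hple : p ≤ s.length := by
    have := PySem.Chars.find_le_length s w
    omega
  have hle := hpre'.length_le
  rw [List.length_drop] at hle
  have hwp : w.length + p ≤ s.length := by omega
  have hwpos : 0 < w.length := List.length_pos_iff.mpr hw
  have hN : s.length - w.length + 1 = (p + 1) + (s.length - w.length - p) := by omega
  unfold occ
  rw [hN, List.range_add, List.countP_append, List.range_succ, List.countP_append,
    List.countP_map]
  have c1 : (List.range p).countP (fun k => decide (w <+: s.drop k)) = 0 := by
    rw [List.countP_eq_zero]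
    intro k hk
    simp only [List.mem_range] at hk
    simp only [decide_eq_true_eq]
    exact hmin k hk
  have c2 : ([p]).countP (fun k => decide (w <+: s.drop k)) = 1 := by
    simp [List.countP_cons, hpre']
  rw [c1, c2]
  have hlen' : (s.drop (p+1)).length = s.length - (p+1) := by simp
  by_cases hc : w.length ≤ (s.drop (p+1)).length
  · have hM : s.length - w.length - p = (s.drop (p+1)).length - w.length + 1 := by omega
    have hco : (List.range ((s.drop (p+1)).length - w.length + 1)).countP
        ((fun k => decide (w <+: s.drop k)) ∘ (fun x => p + 1 + x))
        = (List.range ((s.drop (p+1)).length - w.length + 1)).countP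
          (fun k => decide (w <+: (s.drop (p+1)).drop k)) := by
      apply List.countP_congr
      intro k _
      simp only [Function.comp, List.drop_drop]
    rw [hM, hco]
  · have hM : s.length - w.length - p = 0 := by omega
    have hz : (List.range ((s.drop (p+1)).length - w.length + 1)).countP
        (fun k => decide (w <+: (s.drop (p+1)).drop k)) = 0 := by
      rw [List.countP_eq_zero]
      intro k _
      simp only [decide_eq_true_eq]
      intro hpf
      have := hpf.length_le
      simp at this
      omega
    rw [hM, hz]
    simp

lemma cwLoop_eq (w s : List Char) (hw : w ≠ []) (hs : s ≠ []) :
    ∀ (fuel : Nat) (shortS : List Char), shortS.length < fuel → ∀ count : Int,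
      pyA_cwLoop w s shortS count fuel = count + (occ w shortS : Int) := by
  intro fuel
  induction fuel with
  | zero => intro shortS h; omega
  | succ f ih =>
    intro shortS hlen count
    rw [pyA_cwLoop]
    rw [if_pos hs]
    by_cases hin : PySem.Chars.isIn w shortS = true
    · rw [if_pos hin]
      have hinf : w <:+: shortS := (PySem.Chars.isIn_iff_infix w shortS).mp hin
      have hf : 0 ≤ PySem.Chars.find shortS w := (PySem.Chars.find_nonneg_iff shortS w).mpr hinf
      have hslice : PySem.List.slice shortS (some (PySem.Chars.find shortS w + 1)) none
          = shortS.drop ((PySem.Chars.find shortS w).toNat + 1) := by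
        rw [PySem.List.slice_from shortS (by omega)]
        congr 1
        omega
      have hwpos : 0 < w.length := List.length_pos_iff.mpr hw
      have hsne : 0 < shortS.length := by
        have := hinf.length_le
        omega
      have hlt : (shortS.drop ((PySem.Chars.find shortS w).toNat + 1)).length < f := by
        rw [List.length_drop]
        omega
      rw [hslice, ih _ hlt (count + 1), occ_rec hw hinf]
      push_cast
      ring
    · rw [if_neg hin]
      rw [occ_zero ((PySem.Chars.isIn_eq_false_iff w shortS).mp (by simpa using hin))]
      simp

lemma pyB_cnt_eq_occ (w s : List Char) (hws : w.length ≤ s.length) :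
    pyB_cnt w s = (occ w s : Int) := by
  unfold pyB_cnt
  rw [PySem.List.pyRange_one, List.foldl_map]
  rw [PySem.List.foldl_add (g := fun k : Nat =>
      if (PySem.List.slice s (some (0 + (k:Int))) (some (0 + (k:Int) + (w.length : Int))) == w)
        = true then (1:Int) else 0)]
  rw [PySem.List.sum_map_ite_one_zero
    (fun k : Nat =>
      PySem.List.slice s (some (0 + (k:Int))) (some (0 + (k:Int) + (w.length : Int))) == w)]
  have hN : ((s.length : Int) - (w.length : Int) + 1 - 0).toNat = s.length - w.length + 1 := by
    omega
  rw [hN]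
  unfold occ
  have hcg : (List.range (s.length - w.length + 1)).countP
      (fun k : Nat =>
        PySem.List.slice s (some (0 + (k:Int))) (some (0 + (k:Int) + (w.length : Int))) == w)
      = (List.range (s.length - w.length + 1)).countP (fun k => decide (w <+: s.drop k)) := by
    apply List.countP_congr
    intro k hk
    simp only [List.mem_range] at hk
    have h0 : ((0:Int) + (k:Int)) = ((k:Nat) : Int) := by ring
    rw [h0]
    rw [show (k:Int) + (w.length : Int) = (((k + w.length : Nat)) : Int) from by push_cast; ring]
    rw [show PySem.List.slice s (some ((k:Nat):Int)) (some (((k + w.length : Nat)):Int))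
        = (s.drop k).take ((k + w.length) - k) from PySem.List.slice_natCast s k (k + w.length)]
    have h2 : k + w.length - k = w.length := by omega
    rw [h2]
    by_cases hp : w <+: s.drop k
    · have ht : (s.drop k).take w.length = w := (List.prefix_iff_eq_take.mp hp).symm
      simp [ht, hp]
    · have hne : (s.drop k).take w.length ≠ w := by
        intro he
        exact hp (he ▸ List.take_prefix w.length (s.drop k))
      simp [hne, hp]
  rw [hcg]
  simp

lemma count_eq (w s : List Char) (hin : PySem.Chars.isIn w s = true) (h : w ≠ [] ∨ s = []) :
    pyA_countWord w s = pyB_cnt w s := by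
  rcases h with hw | hs
  · have hinf : w <:+: s := (PySem.Chars.isIn_iff_infix w s).mp hin
    have hwlen : w.length ≤ s.length := hinf.length_le
    have hs : s ≠ [] := by
      intro hnil
      subst hnil
      have h1 := List.length_pos_iff.mpr hw
      have h2 : w.length ≤ 0 := by simpa using hwlen
      omega
    have hf : 0 ≤ PySem.Chars.find s w := (PySem.Chars.find_nonneg_iff s w).mpr hinf
    unfold pyA_countWord
    rw [PySem.List.slice_from s (by omega),
      show (PySem.Chars.find s w + 1).toNat = (PySem.Chars.find s w).toNat + 1 from by omega]
    rw [cwLoop_eq w s hw hs (s.length + 1) _ (by rw [List.length_drop]; omega) 1]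
    rw [pyB_cnt_eq_occ w s hwlen, occ_rec hw hinf]
    push_cast
    ring
  · subst hs
    have hw : w = [] := List.eq_nil_of_infix_nil ((PySem.Chars.isIn_iff_infix w []).mp hin)
    subst hw
    decide

lemma dict_step (d : PySem.Dict String Int) (k : String) (c : Int) :
    (if d.contains k then d.modify k 0 (· + c) else d.insert k c)
      = d.insert k (d.getD k 0 + c) := by
  by_cases h : d.contains k = true
  · rw [if_pos h]
    rfl
  · rw [if_neg h, PySem.Dict.getD_of_not_contains d (0 : Int) (by simpa using h)]
    simp


lemma update_eq (d : PySem.Dict String Int) (s : List Char) (wl : List String)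
    (h : ∀ w ∈ wl, w ≠ "" ∨ s = []) :
    pyA_update d s wl
      = wl.foldl (fun d w =>
          if PySem.Chars.isIn w.toList s then d.insert w (d.getD w 0 + pyB_cnt w.toList s)
          else d) d := by
  unfold pyA_update
  apply PySem.List.foldl_congr_mem
  intro acc w hw
  by_cases hin : PySem.Chars.isIn w.toList s = true
  · rw [if_pos hin, if_pos hin, dict_step]
    rw [count_eq w.toList s hin]
    rcases h w hw with h' | h'
    · exact Or.inl (fun hnil => h' (String.toList_eq_nil_iff.mp hnil))
    · exact Or.inr h'
  · rw [if_neg hin, if_neg hin]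

lemma dstr_empty (rows : List (List String)) (m0 : Nat)
    (h : ∀ r ∈ rows, ∀ c ∈ r.take m0, c = "") : ∀ b, dstr rows m0 b = [] := by
  induction rows with
  | nil => intro b; rfl
  | cons r rest ih =>
    intro b
    rw [dstr]
    by_cases hb : b < m0
    · rw [if_pos hb, ih (fun r hr => h r (by simp [hr])) (b+1)]
      have hc : r.getD b "" = "" := by
        by_cases hbr : b < r.length
        · rw [List.getD_eq_getElem _ _ hbr]
          apply h r (by simp)
          have h1 : (r.take m0)[b]'(by simp; omega) = r[b] := List.getElem_take
          exact h1 ▸ List.getElem_mem _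
        · rw [List.getD_eq_default _ _ (by omega)]
      rw [hc]
      simp
    · rw [if_neg hb]

-- ===== VERDICT (by name: the statement is the Claim_ definition above) =====
theorem check_right_down_spec : Claim_equal_check_right_down := by
  intro rd wl matrix _hdom hpre
  obtain ⟨hne, hrows0, hemp0⟩ := hpre
  have hm0 : matrix.headD [] = PySem.List.pyGetD matrix 0 [] := by
    cases matrix
    · rfl
    · simp [PySem.List.pyGetD_zero_cons]
  set m0n := (PySem.List.pyGetD matrix 0 []).length with hm0n
  have hrows : ∀ r ∈ matrix, m0n ≤ r.length := by
    intro r hr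
    have := hrows0 r hr
    rw [hm0] at this
    exact this
  have hSdiag : ∀ dg : Int,
      PySem.Chars.join [] (((pyB_buckets matrix (m0n : Int)).getD dg []).map String.toList)
        = dstr (matrix.drop dg.toNat) m0n (-dg).toNat := by
    intro dg
    unfold pyB_buckets
    rw [buckets_getD, PySem.Dict.getD_empty, List.nil_append,
      join_collect m0n matrix 0 dg hrows]
    norm_num
  have hA : ∀ i j : Int, 0 ≤ i → 0 ≤ j →
      pyA_diag matrix i j [] = dstr (matrix.drop i.toNat) m0n j.toNat := by
    intro i j hi hj
    rw [pyA_diag_eq matrix (matrix.length - i.toNat) i j hi hj rfl, List.nil_append]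
  have hword : ∀ (a b : Nat), ∀ w ∈ wl, w ≠ "" ∨ dstr (matrix.drop a) m0n b = [] := by
    intro a b w hw
    by_cases hwe : w = ""
    · right
      apply dstr_empty
      intro r hr c hc
      exact hemp0 (hwe ▸ hw) r (List.mem_of_mem_drop hr) c (by rw [hm0, ← hm0n]; exact hc)
    · exact Or.inl hwe
  simp only [Spec_check_right_down, check_right_down, check_right_down_alt, ← hm0n]
  apply congrArg PySem.Dict.items
  rw [List.foldl_append]
  have h1 : (PySem.List.pyRange 0 (matrix.length : Int) 1).foldl
      (fun d i1 => pyA_update d (pyA_diag matrix i1 0 []) wl) (PySem.Dict.mk rd)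
    = (PySem.List.pyRange 0 (matrix.length : Int) 1).foldl
      (fun d dg =>
        wl.foldl (fun d w =>
          if PySem.Chars.isIn w.toList
              (PySem.Chars.join [] (((pyB_buckets matrix (m0n : Int)).getD dg []).map String.toList))
          then d.insert w (d.getD w 0
            + pyB_cnt w.toList
              (PySem.Chars.join [] (((pyB_buckets matrix (m0n : Int)).getD dg []).map String.toList)))
          else d) d) (PySem.Dict.mk rd) := by
    apply PySem.List.foldl_congr_mem
    intro acc x hx
    obtain ⟨hx0, hxn⟩ := PySem.List.mem_pyRange_one.mp hx
    rw [hSdiag x, hA x 0 hx0 le_rfl]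
    rw [show ((-x).toNat) = 0 from by omega, show ((0 : Int).toNat) = 0 from rfl]
    exact update_eq acc _ wl (hword x.toNat 0)
  rw [h1]
  have h2 : ∀ d0 : PySem.Dict String Int,
      (PySem.List.pyRange 1 (m0n : Int) 1).foldl
        (fun d i2 => pyA_update d (pyA_diag matrix 0 i2 []) wl) d0
    = (PySem.List.pyRange (-1) (-(m0n : Int)) (-1)).foldl
      (fun d dg =>
        wl.foldl (fun d w =>
          if PySem.Chars.isIn w.toList
              (PySem.Chars.join [] (((pyB_buckets matrix (m0n : Int)).getD dg []).map String.toList))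
          then d.insert w (d.getD w 0
            + pyB_cnt w.toList
              (PySem.Chars.join [] (((pyB_buckets matrix (m0n : Int)).getD dg []).map String.toList)))
          else d) d) d0 := by
    intro d0
    rw [PySem.List.pyRange_one, PySem.List.pyRange_neg_one, List.foldl_map, List.foldl_map]
    rw [show ((-1 : Int) - -(m0n : Int)).toNat = ((m0n : Int) - 1).toNat from by omega]
    apply PySem.List.foldl_congr_mem
    intro acc k hk
    rw [hSdiag (-1 - (k : Int)), hA 0 (1 + (k : Int)) le_rfl (by omega)]
    rw [show ((0 : Int).toNat) = 0 from rfl, show ((-1 - (k : Int)).toNat) = 0 from by omega,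
      show ((1 + (k : Int)).toNat) = (-(-1 - (k : Int))).toNat from by omega]
    exact update_eq acc _ wl (hword 0 (-(-1 - (k : Int))).toNat)
  rw [h2]
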